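-- pv_equiv track=rewrite | github.com/BobTheZombie/LPM.Org | src/arch_compat.py | _parse_assignments
-- ===== SOURCE A (Python) =====
-- from typing import Callable, Dict, Iterable, List, Mapping, Optional, Sequence, Tuple
--
-- def _parse_assignments(text: str) -> Dict[str, str]:
--     assignments: Dict[str, str] = {}
--     current_key: Optional[str] = None
--     buffer: List[str] = []
--
--     for raw_line in text.splitlines():
--         line = raw_line.strip()
--         if not line or line.startswith("#"):
--             continue
--
--         if current_key:
--             buffer.append(line)
--             if line.endswith(")"):
--                 assignments[current_key] = " ".join(buffer)
--                 current_key = None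
--                 buffer = []
--             continue
--
--         if "=" not in line or line.endswith("()"):
--             continue
--
--         key, value = line.split("=", 1)
--         key = key.strip()
--         value = value.strip()
--         if value.startswith("(") and not value.endswith(")"):
--             current_key = key
--             buffer = [value]
--             continue
--         assignments[key] = value
--
--     return assignments
-- ===== SOURCE B (Python) =====
-- def _parse_assignments(text: str):
--     # Two-level loop: an outer loop over statements, an inner loop that consumes
--     # the continuation lines of a parenthesised multiline value in place.
--     lines = [raw.strip() for raw in text.splitlines()]
--     result = {}
--     i, n = 0, len(lines)
--     while i < n:
--         line = lines[i]
--         i += 1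
--         if not line or line.startswith("#") or "=" not in line or line.endswith("()"):
--             continue
--         key, value = line.split("=", 1)
--         key = key.strip()
--         value = value.strip()
--         if value.startswith("(") and not value.endswith(")"):
--             if not key:
--                 continue  # a parenthesised value needs a non-empty key
--             pieces = [value]
--             while i < n:
--                 cont = lines[i]
--                 i += 1
--                 if not cont or cont.startswith("#"):
--                     continue
--                 pieces.append(cont)
--                 if cont.endswith(")"):
--                     result[key] = " ".join(pieces)
--                     break
--             # an unterminated group at end of input is dropped
--         else:
--             result[key] = value
--     return result
-- ===== Notes on version B (the rewrite author's own statement) =====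
-- stated objective: alternative
-- what changed: Replaces A's single-pass state machine (persistent current_key/buffer state threaded across iterations) with a nested-loop decomposition: an outer loop over statements and an inner loop that consumes and joins the continuation lines of a multiline parenthesised value in place, so no cross-iteration parser state remains.
import Mathlib
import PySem

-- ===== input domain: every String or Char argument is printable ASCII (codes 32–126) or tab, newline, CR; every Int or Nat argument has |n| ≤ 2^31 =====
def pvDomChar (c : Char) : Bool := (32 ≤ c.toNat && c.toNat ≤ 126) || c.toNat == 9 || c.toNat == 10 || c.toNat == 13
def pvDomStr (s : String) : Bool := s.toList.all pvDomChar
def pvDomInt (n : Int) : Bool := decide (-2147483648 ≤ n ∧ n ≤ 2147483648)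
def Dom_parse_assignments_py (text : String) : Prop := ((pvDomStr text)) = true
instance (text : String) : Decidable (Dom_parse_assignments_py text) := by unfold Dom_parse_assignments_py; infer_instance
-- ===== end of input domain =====

-- B replaces A's single-pass state machine by an outer statement loop with an inner
-- loop consuming multiline continuations; same values proved, no speed claim.

-- ===== PORT A =====
-- one iteration of A's for-loop, on the already-stripped line
def pvStepA' (st : PySem.Dict String String × Option String × List String) (line : String) :
    PySem.Dict String String × Option String × List String :=
  if line = "" || PySem.Str.startswith line "#" then st
  else
    match st with
    | (d, ck, buf) =>
      match ck with
      | some k =>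
        if k ≠ "" then
          -- Python: `if current_key:` (truthy — non-None and non-empty)
          let buf' := buf ++ [line]
          if PySem.Str.endswith line ")" then
            (d.insert k (PySem.Str.join " " buf'), none, [])
          else (d, some k, buf')
        else pvFreshA d (some k) buf line
      | none => pvFreshA d none buf line
where
  pvFreshA (d : PySem.Dict String String) (ck : Option String) (buf : List String)
      (line : String) : PySem.Dict String String × Option String × List String :=
    if !(PySem.Str.isIn "=" line) || PySem.Str.endswith line "()" then (d, ck, buf)
    else
      match PySem.Str.splitMax? line "=" 1 with
      | some (k0 :: v0 :: _) =>
        let key := PySem.Str.strip k0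
        let value := PySem.Str.strip v0
        if PySem.Str.startswith value "(" && !(PySem.Str.endswith value ")") then
          (d, some key, [value])
        else (d.insert key value, ck, buf)
      | _ => (d, ck, buf)   -- unreachable: "=" ∈ line, so split yields two parts

def pvStepA (st : PySem.Dict String String × Option String × List String) (raw : String) :
    PySem.Dict String String × Option String × List String :=
  pvStepA' st (PySem.Str.strip raw)

def parse_assignments_py (text : String) : List (String × String) :=
  ((PySem.Str.splitlines text).foldl pvStepA (PySem.Dict.empty, none, [])).1.items

-- ===== PORT B =====
-- inner while-loop: consume continuation lines until one ends with ")";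
-- returns (the collected pieces if closed, the remaining lines)
def pvConsume : List String → Option (List String) × List String
  | [] => (none, [])
  | l :: rest =>
    if l = "" || PySem.Str.startswith l "#" then pvConsume rest
    else if PySem.Str.endswith l ")" then (some [l], rest)
    else
      match pvConsume rest with
      | (o, r) => (o.map (l :: ·), r)

theorem pvConsume_length_le (ls : List String) : (pvConsume ls).2.length ≤ ls.length := by
  induction ls with
  | nil => simp [pvConsume]
  | cons l rest ih =>
    simp only [pvConsume]
    split_ifs with h1 h2
    · exact Nat.le_succ_of_le ih
    · simp
    · cases hc : pvConsume rest with
      | mk o r =>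
        have : r.length ≤ rest.length := by rw [hc] at ih; exact ih
        simp only [List.length_cons]
        exact Nat.le_succ_of_le this

-- outer while-loop over the stripped lines
def pvLoopB (lines : List String) (d : PySem.Dict String String) : PySem.Dict String String :=
  match lines with
  | [] => d
  | line :: rest =>
    if line = "" || PySem.Str.startswith line "#" || !(PySem.Str.isIn "=" line)
        || PySem.Str.endswith line "()" then pvLoopB rest d
    else
      match PySem.Str.splitMax? line "=" 1 with
      | some (k0 :: v0 :: _) =>
        let key := PySem.Str.strip k0
        let value := PySem.Str.strip v0
        if PySem.Str.startswith value "(" && !(PySem.Str.endswith value ")") then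
          if key = "" then pvLoopB rest d
          else
            match hc : pvConsume rest with
            | (some ps, rest') => pvLoopB rest' (d.insert key (PySem.Str.join " " (value :: ps)))
            | (none, _) => d
        else pvLoopB rest (d.insert key value)
      | _ => pvLoopB rest d
  termination_by lines.length
  decreasing_by
    all_goals first
      | (have := pvConsume_length_le rest
         rw [hc] at this
         simp only [List.length_cons]
         exact Nat.lt_succ_of_le this)
      | simp

def parse_assignments_py_alt (text : String) : List (String × String) :=
  (pvLoopB ((PySem.Str.splitlines text).map PySem.Str.strip) PySem.Dict.empty).items

-- ===== PRECONDITION & SPEC =====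
def Spec_parse_assignments_py (text : String) (out : List (String × String)) : Prop := out = parse_assignments_py_alt text
instance (text : String) (out : List (String × String)) : Decidable (Spec_parse_assignments_py text out) := by unfold Spec_parse_assignments_py; infer_instance

-- ===== CLAIM (what is proved, stated in full; the proofs are below) =====
def Claim_equal_parse_assignments_py : Prop := ∀ (text : String), Dom_parse_assignments_py text → Spec_parse_assignments_py text (parse_assignments_py text)

-- ===== LEMMAS AND PROOFS =====

-- The simultaneous invariant, by strong induction on the number of remaining lines:
-- (1) from a falsy parser state (current_key None or "") A's fold agrees with B's outer loop;
-- (2) from an active continuation state A's fold agrees with consume-then-outer-loop.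
theorem pv_main : ∀ (n : Nat) (ls : List String), ls.length ≤ n →
    ∀ d : PySem.Dict String String,
      (∀ ck buf, (ck = none ∨ ck = some "") →
        (ls.foldl pvStepA' (d, ck, buf)).1 = pvLoopB ls d)
      ∧ (∀ k buf, k ≠ "" →
        (ls.foldl pvStepA' (d, some k, buf)).1 =
          match pvConsume ls with
          | (some ps, rest) => pvLoopB rest (d.insert k (PySem.Str.join " " (buf ++ ps)))
          | (none, _) => d) := by
  intro n
  induction n with
  | zero =>
    intro ls hls d
    have h0 : ls = [] := List.eq_nil_of_length_eq_zero (Nat.le_zero.mp hls)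
    subst h0
    refine ⟨fun ck buf _ => ?_, fun k buf _ => ?_⟩ <;> simp [pvLoopB, pvConsume]
  | succ n ih =>
    intro ls hls d
    cases ls with
    | nil => refine ⟨fun ck buf _ => ?_, fun k buf _ => ?_⟩ <;> simp [pvLoopB, pvConsume]
    | cons l rest =>
      have hrest : rest.length ≤ n := by
        simpa using Nat.le_of_succ_le_succ (by simpa using hls)
      by_cases hb : (decide (l = "") || PySem.Str.startswith l "#") = true
      · -- blank or comment line: both sides skip it
        constructor
        · intro ck buf hck
          rw [List.foldl_cons]
          have hA : pvStepA' (d, ck, buf) l = (d, ck, buf) := by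
            simp only [pvStepA']; rw [if_pos hb]
          rw [hA, (ih rest hrest d).1 ck buf hck]
          conv_rhs => rw [pvLoopB]
          have hb' : (decide (l = "") || PySem.Str.startswith l "#"
              || !PySem.Str.isIn "=" l || PySem.Str.endswith l "()") = true := by
            simp only [Bool.or_eq_true] at hb ⊢; tauto
          rw [if_pos hb']
        · intro k buf hk
          rw [List.foldl_cons]
          have hA : pvStepA' (d, some k, buf) l = (d, some k, buf) := by
            simp only [pvStepA']; rw [if_pos hb]
          rw [hA, (ih rest hrest d).2 k buf hk]
          have hC : pvConsume (l :: rest) = pvConsume rest := by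
            simp only [pvConsume]; rw [if_pos hb]
          rw [hC]
      · -- a real line
        have hbB : ∀ c1 c2, (decide (l = "") || PySem.Str.startswith l "#" || c1 || c2)
            = (c1 || c2) := by
          intro c1 c2
          simp only [Bool.or_eq_true, not_or, Bool.not_eq_true] at hb
          rw [hb.1, hb.2]
          rw [Bool.false_or, Bool.false_or]
        constructor
        · intro ck buf hck
          rw [List.foldl_cons]
          have hA : pvStepA' (d, ck, buf) l = pvStepA'.pvFreshA d ck buf l := by
            simp only [pvStepA']; rw [if_neg hb]
            rcases hck with rfl | rfl
            · rfl
            · simp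
          rw [hA]
          conv_rhs => rw [pvLoopB]
          rw [hbB]
          by_cases h2 : (!PySem.Str.isIn "=" l || PySem.Str.endswith l "()") = true
          · have hF : pvStepA'.pvFreshA d ck buf l = (d, ck, buf) := by
              simp only [pvStepA'.pvFreshA]; rw [if_pos h2]
            rw [if_pos h2, hF, (ih rest hrest d).1 ck buf hck]
          · rw [if_neg h2]
            simp only [pvStepA'.pvFreshA]
            rw [if_neg h2]
            cases hsp : PySem.Str.splitMax? l "=" 1 with
            | none => exact (ih rest hrest d).1 ck buf hck
            | some parts =>
              match parts with
              | [] => exact (ih rest hrest d).1 ck buf hck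
              | [_] => exact (ih rest hrest d).1 ck buf hck
              | k0 :: v0 :: tl =>
                simp only
                by_cases h3 : (PySem.Str.startswith (PySem.Str.strip v0) "("
                    && !PySem.Str.endswith (PySem.Str.strip v0) ")") = true
                · rw [if_pos h3, if_pos h3]
                  by_cases h4 : PySem.Str.strip k0 = ""
                  · rw [if_pos h4]
                    exact (ih rest hrest d).1 (some (PySem.Str.strip k0)) [PySem.Str.strip v0]
                      (Or.inr (by rw [h4]))
                  · rw [if_neg h4]
                    have := (ih rest hrest d).2 (PySem.Str.strip k0) [PySem.Str.strip v0] h4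
                    rw [this]
                    cases hc : pvConsume rest with
                    | mk o r =>
                      cases o with
                      | none => rfl
                      | some ps => simp
                · rw [if_neg h3, if_neg h3]
                  exact (ih rest hrest (d.insert (PySem.Str.strip k0) (PySem.Str.strip v0))).1
                    ck buf hck
        · intro k buf hk
          rw [List.foldl_cons]
          have hA : pvStepA' (d, some k, buf) l =
              (if PySem.Str.endswith l ")" then
                (d.insert k (PySem.Str.join " " (buf ++ [l])), none, [])
              else (d, some k, buf ++ [l])) := by
            simp only [pvStepA']; rw [if_neg hb]
            simp [hk]
          rw [hA]
          have hC : pvConsume (l :: rest) =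
              (if PySem.Str.endswith l ")" then ((some [l] : Option (List String)), rest)
               else (match pvConsume rest with | (o, r) => (o.map (l :: ·), r))) := by
            simp only [pvConsume]; rw [if_neg hb]
          rw [hC]
          by_cases h5 : PySem.Str.endswith l ")" = true
          · rw [if_pos h5, if_pos h5]
            exact (ih rest hrest (d.insert k (PySem.Str.join " " (buf ++ [l])))).1 none []
              (Or.inl rfl)
          · rw [if_neg h5, if_neg h5]
            have := (ih rest hrest d).2 k (buf ++ [l]) hk
            rw [this]
            cases hc : pvConsume rest with
            | mk o r =>
              cases o with
              | none => rfl
              | some ps => simp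

theorem pv_equiv (ls : List String) (d : PySem.Dict String String) :
    (ls.foldl pvStepA' (d, none, [])).1 = pvLoopB ls d :=
  ((pv_main ls.length ls le_rfl d).1 none [] (Or.inl rfl))

-- ===== VERDICT (by name: the statement is the Claim_ definition above) =====
theorem parse_assignments_py_spec : Claim_equal_parse_assignments_py := by
  intro text _
  unfold Spec_parse_assignments_py parse_assignments_py parse_assignments_py_alt
  rw [← pv_equiv]
  have hfun : pvStepA = fun st raw => pvStepA' st (PySem.Str.strip raw) := rfl
  rw [hfun, ← List.foldl_map]
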